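-- pv_equiv track=rewrite | github.com/PabloBerucm/project_1_GIW | pr2_skel.py | codigos_postales
-- ===== SOURCE A (Python) =====
-- def codigos_postales(monumentos):
--     """
--     devuelve lista de parejas con el numero total de documentos que hay en cada codigo postal
--
--     """
--     contador = {} #creamos contador para mantener el orden
--
--     for m in monumentos:
--         #extraemos codigo postal, en el caso de que no exista, usamos cadena vacia
--         codigo_postal = m.get("address", {}).get("postal-code", "")
--         contador[codigo_postal] = contador.get(codigo_postal, 0) +1
--
--     #convertimos el contador a la lista de tuplas
--     lista_codigos = list(contador.items())
--
--     #ordenamos primero por numero de monumentos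
--     lista_codigos.sort(key=lambda x: x[1], reverse=True)
--
--     return lista_codigos
-- ===== SOURCE B (Python) =====
-- def codigos_postales(monumentos):
--     """
--     devuelve lista de parejas con el numero total de documentos que hay en cada codigo postal
--     """
--     # pass 1: extract all postal codes (empty string when missing)
--     claves = [m.get("address", {}).get("postal-code", "") for m in monumentos]
--     # distinct codes in first-occurrence order, paired with their multiplicity
--     pares = [(cp, claves.count(cp)) for cp in dict.fromkeys(claves)]
--     # bucket sweep: counts run downward from the largest possible value len(claves);
--     # within each count value, first-occurrence order is kept (= stable desc sort)
--     res = []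
--     for n in range(len(claves), 0, -1):
--         for par in pares:
--             if par[1] == n:
--                 res.append(par)
--     return res
-- ===== Notes on version B (the rewrite author's own statement) =====
-- stated objective: alternative
-- what changed: replaces the dict-accumulator counting pass and comparison sort by three staged passes: a list comprehension extracting all codes, counts via dict.fromkeys + list.count, and a counting-sort sweep of count values from len(claves) down to 1 emitting each bucket in first-occurrence order (matching the stable descending sort exactly)
import Mathlib
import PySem

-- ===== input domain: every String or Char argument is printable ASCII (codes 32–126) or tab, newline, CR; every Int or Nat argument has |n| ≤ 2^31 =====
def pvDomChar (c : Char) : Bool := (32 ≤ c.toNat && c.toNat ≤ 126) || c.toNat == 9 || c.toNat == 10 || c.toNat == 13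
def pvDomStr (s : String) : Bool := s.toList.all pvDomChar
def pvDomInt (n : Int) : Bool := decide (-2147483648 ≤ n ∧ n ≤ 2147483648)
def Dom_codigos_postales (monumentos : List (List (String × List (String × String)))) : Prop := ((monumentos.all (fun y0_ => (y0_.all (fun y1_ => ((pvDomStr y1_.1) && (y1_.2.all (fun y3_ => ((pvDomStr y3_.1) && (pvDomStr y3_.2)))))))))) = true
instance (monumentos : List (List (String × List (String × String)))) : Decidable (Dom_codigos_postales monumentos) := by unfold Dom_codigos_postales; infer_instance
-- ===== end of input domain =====

-- B replaces A's dict-accumulator + comparison sort by staged passes (extract, dedup+count, bucket sweep); objective: alternative, same result.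

-- ===== PORT A =====
def codigos_postales (monumentos : List (List (String × List (String × String)))) : List (String × Int) :=
  let contador : PySem.Dict String Int := monumentos.foldl (fun d m =>
    let codigo_postal :=
      (PySem.Dict.ofList ((PySem.Dict.ofList m).getD "address" [])).getD "postal-code" ""
    d.insert codigo_postal (d.getD codigo_postal 0 + 1)) PySem.Dict.empty
  let lista_codigos := contador.items
  PySem.List.sorted lista_codigos (fun x => x.2) true

-- ===== PORT B =====
def codigos_postales_alt (monumentos : List (List (String × List (String × String)))) : List (String × Int) :=
  let claves := monumentos.map (fun m =>
    (PySem.Dict.ofList ((PySem.Dict.ofList m).getD "address" [])).getD "postal-code" "")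
  let pares : List (String × Int) :=
    (PySem.Set.ofList claves).map (fun cp => (cp, (claves.count cp : Int)))
  (PySem.List.pyRange (claves.length : Int) 0 (-1)).foldl (fun res n =>
    pares.foldl (fun res par => if par.2 == n then res ++ [par] else res) res) []

-- ===== PRECONDITION & SPEC =====
def Spec_codigos_postales (monumentos : List (List (String × List (String × String)))) (out : List (String × Int)) : Prop := out = codigos_postales_alt monumentos
instance (monumentos : List (List (String × List (String × String)))) (out : List (String × Int)) : Decidable (Spec_codigos_postales monumentos out) := by unfold Spec_codigos_postales; infer_instance

-- ===== CLAIM =====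
def Claim_equal_codigos_postales : Prop := ∀ (monumentos : List (List (String × List (String × String)))), Dom_codigos_postales monumentos → Spec_codigos_postales monumentos (codigos_postales monumentos)

-- ===== LEMMAS AND PROOFS =====

-- the insertion predicate of Python's stable sort with key = snd, reverse = True
def pvPred : (String × Int) → (String × Int) → Bool := fun a b => decide (b.2 < a.2)

-- bucket concatenation: for each n in ns, the items of xs with count n, in order
def pvF (ns : List Int) (xs : List (String × Int)) : List (String × Int) :=
  ns.flatMap (fun n => xs.filter (fun p => p.2 == n))

theorem pv_mem_F {y : String × Int} {ns : List Int} {xs : List (String × Int)}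
    (h : y ∈ pvF ns xs) : y.2 ∈ ns := by
  simp only [pvF, List.mem_flatMap, List.mem_filter, beq_iff_eq] at h
  obtain ⟨n, hn, _, hy⟩ := h
  exact hy ▸ hn

theorem pv_insertBy_front (before : (String × Int) → (String × Int) → Bool) (x : String × Int)
    (l1 l2 : List (String × Int)) (h : ∀ y ∈ l1, before x y = false) :
    PySem.List.insertBy before x (l1 ++ l2) = l1 ++ PySem.List.insertBy before x l2 := by
  induction l1 with
  | nil => simp
  | cons y ys ih =>
    have hy : before x y = false := h y (by simp)
    have e : PySem.List.insertBy before x ((y :: ys) ++ l2) =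
        y :: PySem.List.insertBy before x (ys ++ l2) := by
      simp [PySem.List.insertBy, hy]
    rw [e, ih (fun z hz => h z (by simp [hz]))]
    simp

theorem pv_insertBy_all (before : (String × Int) → (String × Int) → Bool) (x : String × Int)
    (l2 : List (String × Int)) (h : ∀ y ∈ l2, before x y = true) :
    PySem.List.insertBy before x l2 = x :: l2 := by
  cases l2 with
  | nil => rfl
  | cons y ys => simp [PySem.List.insertBy, h y (by simp)]

theorem pv_F_append_not (ns : List Int) (xs : List (String × Int)) (x : String × Int)
    (h : x.2 ∉ ns) : pvF ns (xs ++ [x]) = pvF ns xs := by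
  induction ns with
  | nil => rfl
  | cons n ns' ih =>
    have hxn : (x.2 == n) = false := by
      simp only [beq_eq_false_iff_ne, ne_eq]
      exact fun hc => h (by simp [hc])
    simp only [pvF, List.flatMap_cons] at *
    rw [List.filter_append, ih (fun hc => h (by simp [hc]))]
    simp [hxn]

theorem pv_ins (ns : List Int) (hns : ns.Pairwise (fun a b => b < a)) :
    ∀ (xs : List (String × Int)) (x : String × Int), x.2 ∈ ns →
      PySem.List.insertBy pvPred x (pvF ns xs) = pvF ns (xs ++ [x]) := by
  induction ns with
  | nil => intro xs x hx; exact absurd hx (by simp)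
  | cons n ns' ih =>
    intro xs x hx
    obtain ⟨h1, h2⟩ := List.pairwise_cons.mp hns
    have hFcons : ∀ ys : List (String × Int),
        pvF (n :: ns') ys = ys.filter (fun p => p.2 == n) ++ pvF ns' ys := by
      intro ys; simp [pvF]
    by_cases hxn : x.2 = n
    · have hfront : ∀ y ∈ xs.filter (fun p => p.2 == n), pvPred x y = false := by
        intro y hy
        have : y.2 = n := by simpa using (List.mem_filter.mp hy).2
        simp [pvPred, this, hxn]
      have hall : ∀ y ∈ pvF ns' xs, pvPred x y = true := by
        intro y hy
        have hy2 := pv_mem_F hy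
        have : y.2 < n := h1 _ hy2
        simp [pvPred, hxn, this]
      have hnotmem : x.2 ∉ ns' := by
        intro hc; exact absurd (h1 _ hc) (by simp [hxn])
      rw [hFcons xs, pv_insertBy_front _ _ _ _ hfront, pv_insertBy_all _ _ _ hall,
        hFcons (xs ++ [x]), pv_F_append_not ns' xs x hnotmem, List.filter_append]
      simp [hxn]
    · have hx' : x.2 ∈ ns' := by
        rcases List.mem_cons.mp hx with h | h
        · exact absurd h hxn
        · exact h
      have hxlt : x.2 < n := h1 _ hx'
      have hfront : ∀ y ∈ xs.filter (fun p => p.2 == n), pvPred x y = false := by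
        intro y hy
        have : y.2 = n := by simpa using (List.mem_filter.mp hy).2
        simp only [pvPred, this, decide_eq_false_iff_not, not_lt]
        exact le_of_lt hxlt
      rw [hFcons xs, pv_insertBy_front _ _ _ _ hfront, ih h2 xs x hx',
        hFcons (xs ++ [x]), List.filter_append]
      simp [hxn]

theorem pv_sorted_eq_F (ns : List Int) (hns : ns.Pairwise (fun a b => b < a)) :
    ∀ (xs : List (String × Int)), (∀ p ∈ xs, p.2 ∈ ns) →
      PySem.List.sorted xs (fun p => p.2) true = pvF ns xs := by
  intro xs
  rw [PySem.List.sorted_rev_eq_foldl_insertBy]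
  induction xs using List.reverseRecOn with
  | nil => intro _; simp [pvF]
  | append_singleton xs x ih =>
    intro h
    rw [List.foldl_append]
    simp only [List.foldl_cons, List.foldl_nil]
    rw [ih (fun p hp => h p (by simp [hp]))]
    exact pv_ins ns hns xs x (h x (by simp))

theorem pv_range_pairwise (M : Int) :
    (PySem.List.pyRange M 0 (-1)).Pairwise (fun a b => b < a) := by
  rw [PySem.List.pyRange_neg_one_eq_reverse]
  rw [List.pairwise_reverse]
  exact PySem.List.pairwise_lt_pyRange_one _ _

-- ===== VERDICT =====
theorem codigos_postales_spec : Claim_equal_codigos_postales := by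
  intro monumentos _
  show codigos_postales monumentos = codigos_postales_alt monumentos
  unfold codigos_postales codigos_postales_alt
  dsimp only
  set claves := monumentos.map (fun m =>
    (PySem.Dict.ofList ((PySem.Dict.ofList m).getD "address" [])).getD "postal-code" "") with hks
  -- A's accumulated dict is Counter(claves)
  have hctr : monumentos.foldl (fun d m =>
      let codigo_postal := (PySem.Dict.ofList ((PySem.Dict.ofList m).getD "address" [])).getD "postal-code" ""
      d.insert codigo_postal (d.getD codigo_postal 0 + 1)) PySem.Dict.empty =
      PySem.Dict.counter claves := by
    rw [← PySem.Dict.foldl_insert_getD_add_one_eq_counter, hks, List.foldl_map]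
  rw [hctr]
  -- its items list is exactly B's pares
  rw [PySem.Dict.items_counter]
  set pares := (PySem.Set.ofList claves).map (fun cp => (cp, (claves.count cp : Int))) with hp
  -- B's sweep is the bucket concatenation pvF over the count-down range
  have hB : (PySem.List.pyRange (claves.length : Int) 0 (-1)).foldl (fun res n =>
      pares.foldl (fun res par => if par.2 == n then res ++ [par] else res) res) [] =
      pvF (PySem.List.pyRange (claves.length : Int) 0 (-1)) pares := by
    have hfe : (fun (res : List (String × Int)) (n : Int) =>
        pares.foldl (fun res par => if par.2 == n then res ++ [par] else res) res) =
        (fun res n => res ++ pares.filter (fun par => par.2 == n)) := by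
      funext res n
      exact PySem.List.foldl_append_if_eq_filter (fun par => par.2 == n) pares res
    rw [hfe, PySem.List.foldl_append_eq_flatMap]
    rfl
  rw [hB]
  -- the sorted items equal that bucket concatenation: every count lies in (0, len]
  refine pv_sorted_eq_F _ (pv_range_pairwise _) pares (fun p hpm => ?_)
  rw [hp] at hpm
  obtain ⟨k, hk, hpk⟩ := List.mem_map.mp hpm
  have hkmem : k ∈ claves := (PySem.Set.mem_ofList claves k).mp hk
  have hpos : 0 < List.count k claves := List.count_pos_iff.mpr hkmem
  have hle : List.count k claves ≤ claves.length := List.count_le_length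
  rw [← hpk]
  apply PySem.List.mem_pyRange_neg_one.mpr
  constructor
  · show (0 : Int) < (List.count k claves : Int)
    exact_mod_cast hpos
  · show (List.count k claves : Int) ≤ (claves.length : Int)
    exact_mod_cast hle
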